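-- pv_equiv track=rewrite | github.com/Py-Contributors/AlgorithmsAndDataStructure | Python/Algorithms/DynamicPrograming/Gold_Mine.py | gold_mine
-- ===== SOURCE A (Python) =====
-- def gold_mine(gold, m, n):
--     # creating a table for storing intermediate results and intialize all cells to 0.
--     # first row gives the maximum gold that the miner can collect when starts from that row.
--     dp = [[0 for i in range(n)] for j in range(m)]
--     for col in range(n - 1, -1, -1):
--         for row in range(m):
--             # Gold collected on going cell to the right
--             if col == n - 1:
--                 right = 0
--             else:
--                 right = dp[row][col + 1]
--             # Gold collected on going cell to the right up
--             if row == 0 or col == n - 1: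
--                 right_up = 0
--             else:
--                 right_up = dp[row - 1][col + 1]
--             # Gold collected on going cell to the right down
--             if row == m - 1 or col == n - 1:
--                 right_down = 0
--             else:
--                 right_down = dp[row + 1][col + 1]
--             # Max collected on choosing either of thr three path
--             dp[row][col] += gold[row][col] + max(right_up, right, right_down)
--     # Max Gold collected will be maximum value of the first column.
--     res = dp[0][0]
--     for i in range(1, m):
--         res = max(res, dp[i][0])
--     return res
-- ===== SOURCE B (Python) =====
-- def gold_mine(gold, m, n):
--     # Top-down memoized recursion on the same recurrence, cached by (row, col).
--     memo = {}
--
--     def solve(r, c):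
--         if (r, c) in memo:
--             return memo[(r, c)]
--         right = 0 if c == n - 1 else solve(r, c + 1)
--         right_up = 0 if r == 0 or c == n - 1 else solve(r - 1, c + 1)
--         right_down = 0 if r == m - 1 or c == n - 1 else solve(r + 1, c + 1)
--         val = gold[r][c] + max(right_up, right, right_down)
--         memo[(r, c)] = val
--         return val
--
--     res = solve(0, 0)
--     for i in range(1, m):
--         res = max(res, solve(i, 0))
--     return res
-- ===== Notes on version B (the rewrite author's own statement) =====
-- stated objective: alternative
-- what changed: Replaces A's bottom-up in-place table fill (explicit column-by-column loops over a 2D dp array) with demand-driven top-down recursion: a nested solve(r,c) computes each cell's value on first use and caches it in a dict keyed by (r,c); the answer is reduced from solve(i,0) calls instead of reading a table.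
import Mathlib
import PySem

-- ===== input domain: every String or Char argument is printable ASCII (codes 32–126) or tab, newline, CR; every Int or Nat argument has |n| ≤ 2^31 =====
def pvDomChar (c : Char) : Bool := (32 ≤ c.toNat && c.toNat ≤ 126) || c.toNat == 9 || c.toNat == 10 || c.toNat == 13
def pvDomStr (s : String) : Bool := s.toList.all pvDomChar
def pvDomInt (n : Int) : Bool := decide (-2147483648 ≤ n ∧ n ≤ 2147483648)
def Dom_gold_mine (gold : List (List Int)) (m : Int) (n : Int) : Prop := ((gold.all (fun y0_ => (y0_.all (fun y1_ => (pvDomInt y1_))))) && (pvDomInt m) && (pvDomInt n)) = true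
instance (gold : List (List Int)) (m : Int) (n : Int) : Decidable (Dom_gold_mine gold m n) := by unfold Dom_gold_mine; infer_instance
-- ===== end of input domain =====

-- B replaces A's bottom-up in-place table fill by demand-driven top-down memoized recursion
-- (a solve(r,c) helper cached in a dict keyed by (r,c)); alternative decomposition, same cost.


-- ===== PORT A =====
-- body of A's inner 'for row in range(m)' loop (dp[row][col] += gold[row][col] + max(...))
def goldAInner (gold : List (List Int)) (m n col : Int) (dp : List (List Int)) (row : Int) : List (List Int) :=
  let right : Int := if col = n - 1 then 0 else PySem.List.pyGetD (PySem.List.pyGetD dp row []) (col + 1) 0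
  let right_up : Int := if row = 0 ∨ col = n - 1 then 0 else PySem.List.pyGetD (PySem.List.pyGetD dp (row - 1) []) (col + 1) 0
  let right_down : Int := if row = m - 1 ∨ col = n - 1 then 0 else PySem.List.pyGetD (PySem.List.pyGetD dp (row + 1) []) (col + 1) 0
  let cur : Int := PySem.List.pyGetD (PySem.List.pyGetD dp row []) col 0
  PySem.List.pySetD dp row
    (PySem.List.pySetD (PySem.List.pyGetD dp row []) col
      (cur + (PySem.List.pyGetD (PySem.List.pyGetD gold row []) col 0 + max (max right_up right) right_down)))

-- body of A's outer 'for col in range(n-1, -1, -1)' loop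
def goldAOuter (gold : List (List Int)) (m n : Int) (dp : List (List Int)) (col : Int) : List (List Int) :=
  (PySem.List.pyRange 0 m 1).foldl (goldAInner gold m n col) dp

def gold_mine (gold : List (List Int)) (m : Int) (n : Int) : Int :=
  let dp0 : List (List Int) :=
    (PySem.List.pyRange 0 m 1).map (fun _ => (PySem.List.pyRange 0 n 1).map (fun _ => (0 : Int)))
  let dp := (PySem.List.pyRange (n - 1) (-1) (-1)).foldl (goldAOuter gold m n) dp0
  let res := PySem.List.pyGetD (PySem.List.pyGetD dp 0 []) 0 0
  (PySem.List.pyRange 1 m 1).foldl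
    (fun res i => max res (PySem.List.pyGetD (PySem.List.pyGetD dp i []) 0 0)) res

-- ===== PORT B =====
-- B's nested 'solve(r, c)': memoized recursion; 'fuel' is only a termination device
-- (each recursive call moves to column c+1, so n - c bounds the depth; fuel 0 is unreachable
-- for the calls gold_mine_alt makes on inputs satisfying Pre_).
def gmSolve (gold : List (List Int)) (m n : Int) :
    Nat → Int → Int → PySem.Dict (Int × Int) Int → Int × PySem.Dict (Int × Int) Int
  | 0, _, _, memo => (0, memo)
  | fuel + 1, r, c, memo =>
    match memo.get? (r, c) with
    | some v => (v, memo)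
    | none =>
      let p1 := if c = n - 1 then ((0 : Int), memo) else gmSolve gold m n fuel r (c + 1) memo
      let p2 := if r = 0 ∨ c = n - 1 then ((0 : Int), p1.2) else gmSolve gold m n fuel (r - 1) (c + 1) p1.2
      let p3 := if r = m - 1 ∨ c = n - 1 then ((0 : Int), p2.2) else gmSolve gold m n fuel (r + 1) (c + 1) p2.2
      let val := PySem.List.pyGetD (PySem.List.pyGetD gold r []) c 0 + max (max p2.1 p1.1) p3.1
      (val, p3.2.insert (r, c) val)

def gold_mine_alt (gold : List (List Int)) (m : Int) (n : Int) : Int :=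
  let fuel := n.toNat + 1
  let p := gmSolve gold m n fuel 0 0 PySem.Dict.empty   -- res = solve(0, 0) with memo = {}
  ((PySem.List.pyRange 1 m 1).foldl
    (fun st i =>
      let q := gmSolve gold m n fuel i 0 st.2           -- res = max(res, solve(i, 0))
      (max st.1 q.1, q.2)) p).1

-- ===== PRECONDITION & SPEC =====
-- Pre_ holds exactly where Python A returns: at least one row and one column are requested
-- (else dp[0][0] raises IndexError) and gold really has m rows of at least n cells each
-- (else gold[row][col] raises IndexError).
def Pre_gold_mine (gold : List (List Int)) (m : Int) (n : Int) : Prop :=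
  1 ≤ m ∧ m ≤ (gold.length : Int) ∧ 1 ≤ n ∧ ∀ row ∈ gold.take m.toNat, n ≤ (row.length : Int)
instance (gold : List (List Int)) (m : Int) (n : Int) : Decidable (Pre_gold_mine gold m n) := by
  unfold Pre_gold_mine; infer_instance

def pvWitness_gold_mine : List (List Int) × Int × Int := ([[1, 3], [2, 1], [5, 0]], 3, 2)

def Spec_gold_mine (gold : List (List Int)) (m : Int) (n : Int) (out : Int) : Prop :=
  out = gold_mine_alt gold m n
instance (gold : List (List Int)) (m : Int) (n : Int) (out : Int) : Decidable (Spec_gold_mine gold m n out) := by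
  unfold Spec_gold_mine; infer_instance

-- ===== CLAIM (what is proved, stated in full; the proofs are below) =====
def Claim_equal_gold_mine : Prop := ∀ (gold : List (List Int)) (m : Int) (n : Int),
  Dom_gold_mine gold m n → Pre_gold_mine gold m n → Spec_gold_mine gold m n (gold_mine gold m n)

-- ===== LEMMAS AND PROOFS =====

-- the mathematical value of the recurrence, with fuel (fuel ≥ N - c makes it the true value)
def gmV (gold : List (List Int)) (M N : Nat) : Nat → Nat → Nat → Int
  | 0, _, _ => 0
  | f + 1, r, c =>
    (gold.getD r []).getD c 0 +
      max (max (if r = 0 ∨ c = N - 1 then 0 else gmV gold M N f (r - 1) (c + 1))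
               (if c = N - 1 then 0 else gmV gold M N f r (c + 1)))
          (if r = M - 1 ∨ c = N - 1 then 0 else gmV gold M N f (r + 1) (c + 1))

theorem gmV_succ (gold : List (List Int)) (M N f r c : Nat) :
    gmV gold M N (f + 1) r c =
      (gold.getD r []).getD c 0 +
        max (max (if r = 0 ∨ c = N - 1 then 0 else gmV gold M N f (r - 1) (c + 1))
                 (if c = N - 1 then 0 else gmV gold M N f r (c + 1)))
            (if r = M - 1 ∨ c = N - 1 then 0 else gmV gold M N f (r + 1) (c + 1)) := rfl

-- the value written into dp[r][c] by A's inner loop (reads refer to the pre-inner-loop table)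
def gmVal (gold : List (List Int)) (M N c : Nat) (dp : List (List Int)) (r : Nat) : Int :=
  (dp.getD r []).getD c 0 +
    ((gold.getD r []).getD c 0 +
      max (max (if r = 0 ∨ c = N - 1 then 0 else (dp.getD (r - 1) []).getD (c + 1) 0)
               (if c = N - 1 then 0 else (dp.getD r []).getD (c + 1) 0))
          (if r = M - 1 ∨ c = N - 1 then 0 else (dp.getD (r + 1) []).getD (c + 1) 0))

-- invariant on A's table after the columns ≥ c have been filled
def GMA (gold : List (List Int)) (M N c : Nat) (dp : List (List Int)) : Prop :=
  dp.length = M ∧ (∀ r, r < M → (dp.getD r []).length = N) ∧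
  (∀ r j, r < M → j < c → (dp.getD r []).getD j 0 = 0) ∧
  (∀ r j, r < M → c ≤ j → j < N → (dp.getD r []).getD j 0 = gmV gold M N (N - j) r j)

-- invariant on B's memo dict: every cached value is the true value of its cell
def gmInv (gold : List (List Int)) (M N : Nat) (memo : PySem.Dict (Int × Int) Int) : Prop :=
  ∀ (r c v : Int), memo.get? (r, c) = some v →
    0 ≤ r ∧ r < (M : Int) ∧ 0 ≤ c ∧ c < (N : Int) ∧ v = gmV gold M N (N - c.toNat) r.toNat c.toNat

-- getD through List.set, both indices Nat
theorem gmGetD_set {α : Type} (l : List α) (i : Nat) (a d : α) (hi : i < l.length) (j : Nat) :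
    (l.set i a).getD j d = if j = i then a else l.getD j d := by
  rcases eq_or_ne j i with rfl | h
  · simp [List.getD_eq_getElem?_getD, hi]
  · simp [List.getD_eq_getElem?_getD, List.getElem?_set_ne (Ne.symm h), h]

-- A's inner row loop, characterised entry by entry (reads refer to the starting table dp)
theorem gmFoldA_spec (gold : List (List Int)) (M N c : Nat) (dp : List (List Int))
    (hc : c < N) (hlen : dp.length = M) (hrow : ∀ r, r < M → (dp.getD r []).length = N) :
    ∀ t, t ≤ M →
      (((List.range t).foldl (fun d k => goldAInner gold (M : Int) (N : Int) (c : Int) d ((0 : Int) + (k : Nat))) dp).length = M) ∧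
      (∀ r, r < M → ((((List.range t).foldl (fun d k => goldAInner gold (M : Int) (N : Int) (c : Int) d ((0 : Int) + (k : Nat))) dp).getD r []).length = N)) ∧
      (∀ r j, r < M → j < N →
        ((((List.range t).foldl (fun d k => goldAInner gold (M : Int) (N : Int) (c : Int) d ((0 : Int) + (k : Nat))) dp).getD r []).getD j 0 =
          if r < t ∧ j = c then gmVal gold M N c dp r else (dp.getD r []).getD j 0)) := by
  intro t
  induction t with
  | zero => intro _; refine ⟨hlen, hrow, ?_⟩; intro r j hr hj; simp
  | succ t ih =>
    intro ht
    obtain ⟨ihlen, ihrow, ihval⟩ := ih (by omega)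
    set S := (List.range t).foldl (fun d k => goldAInner gold (M : Int) (N : Int) (c : Int) d ((0 : Int) + (k : Nat))) dp with hS
    have hstep : (List.range (t + 1)).foldl (fun d k => goldAInner gold (M : Int) (N : Int) (c : Int) d ((0 : Int) + (k : Nat))) dp
        = goldAInner gold (M : Int) (N : Int) (c : Int) S ((0 : Int) + (t : Nat)) := by
      rw [List.range_succ, List.foldl_append]; rfl
    have htM : t < M := by omega
    have htS : t < S.length := by omega
    have hcS : c < (S.getD t []).length := by rw [ihrow t htM]; exact hc
    have hbody : goldAInner gold (M : Int) (N : Int) (c : Int) S ((0 : Int) + (t : Nat))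
        = S.set t ((S.getD t []).set c (gmVal gold M N c dp t)) := by
      have hcc : ((c : Int) + 1) = ((c + 1 : Nat) : Int) := by push_cast; ring
      unfold goldAInner
      simp only [zero_add, hcc, PySem.List.pySetD_natCast, PySem.List.pyGetD_natCast]
      congr 2
      · rw [ihval t c htM hc, if_neg (by omega)]
        unfold gmVal
        rcases eq_or_ne c (N - 1) with hcn | hcn
        · have hN1 : ((N - 1 : Nat) : Int) = (N : Int) - 1 := by omega
          simp [hcn, hN1]
        · have hci : (c : Int) ≠ (N : Int) - 1 := by omega
          have hc1 : c + 1 < N := by omega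
          have hmid : (S.getD t []).getD (c + 1) 0 = (dp.getD t []).getD (c + 1) 0 := by
            rw [ihval t (c + 1) htM hc1, if_neg (by omega)]
          congr 1
          congr 1
          congr 1
          · congr 1
            · rcases Nat.eq_zero_or_pos t with rfl | ht1
              · rw [if_pos (Or.inl (by norm_num)), if_pos (Or.inl rfl)]
              · rw [if_neg (not_or.mpr ⟨by omega, hci⟩), if_neg (not_or.mpr ⟨by omega, hcn⟩),
                  show ((t : Nat) : Int) - 1 = ((t - 1 : Nat) : Int) by omega,
                  PySem.List.pyGetD_natCast, ihval (t - 1) (c + 1) (by omega) hc1,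
                  if_neg (by omega)]
            · rw [if_neg hci, if_neg hcn, hmid]
          · rcases eq_or_ne t (M - 1) with h | h
            · rw [if_pos (Or.inl (by omega)), if_pos (Or.inl h)]
            · rw [if_neg (not_or.mpr ⟨by omega, hcn⟩),
                if_neg (not_or.mpr ⟨(by omega : ¬((t : Int) = (M : Int) - 1)), hci⟩),
                show ((t : Nat) : Int) + 1 = ((t + 1 : Nat) : Int) by push_cast; ring,
                PySem.List.pyGetD_natCast, ihval (t + 1) (c + 1) (by omega) hc1]
              rw [if_neg (show ¬(t + 1 < t ∧ c + 1 = c) by omega)]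
    refine ⟨?_, ?_, ?_⟩
    · rw [hstep, hbody]; simp [ihlen]
    · intro r hr; rw [hstep, hbody, gmGetD_set S t _ [] htS r]
      rcases eq_or_ne r t with rfl | hne
      · rw [if_pos rfl, List.length_set]; exact ihrow r htM
      · rw [if_neg hne]; exact ihrow r hr
    · intro r j hr hj
      rw [hstep, hbody, gmGetD_set S t _ [] htS r]
      rcases eq_or_ne r t with rfl | hne
      · rw [if_pos rfl, gmGetD_set (S.getD r []) c _ 0 hcS j]
        rcases eq_or_ne j c with rfl | hjc
        · simp
        · rw [if_neg hjc, ihval r j hr hj, if_neg (by omega), if_neg (by omega)]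
      · rw [if_neg hne, ihval r j hr hj]
        by_cases h1 : r < t ∧ j = c
        · rw [if_pos h1, if_pos ⟨by omega, h1.2⟩]
        · rw [if_neg h1, if_neg (by omega)]

-- gmVal at a cell whose right neighbours already hold the true values IS the true value
theorem gmVal_eq (gold : List (List Int)) (M N c : Nat) (dp : List (List Int)) (r : Nat)
    (hr : r < M) (hc : c < N)
    (hz : (dp.getD r []).getD c 0 = 0)
    (hnext : ∀ s, s < M → c + 1 < N → (dp.getD s []).getD (c + 1) 0 = gmV gold M N (N - (c + 1)) s (c + 1)) :
    gmVal gold M N c dp r = gmV gold M N (N - c) r c := by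
  have hNc : N - c = (N - (c + 1)) + 1 := by omega
  rw [hNc]
  unfold gmVal gmV
  rw [hz, zero_add]
  congr 1
  rcases eq_or_ne c (N - 1) with hcn | hcn
  · simp [hcn]
  · have hc1 : c + 1 < N := by omega
    congr 1
    · congr 1
      · rcases Nat.eq_zero_or_pos r with rfl | hr1
        · simp
        · rw [if_neg (not_or.mpr ⟨by omega, hcn⟩), if_neg (not_or.mpr ⟨by omega, hcn⟩),
            hnext (r - 1) (by omega) hc1]
      · rw [if_neg hcn, if_neg hcn, hnext r hr hc1]
    · rcases eq_or_ne r (M - 1) with h | h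
      · simp [h]
      · rw [if_neg (not_or.mpr ⟨h, hcn⟩), if_neg (not_or.mpr ⟨h, hcn⟩),
          hnext (r + 1) (by omega) hc1]

theorem gmStepA (gold : List (List Int)) (M N c : Nat) (hc : c < N)
    (dp : List (List Int)) (h : GMA gold M N (c + 1) dp) :
    GMA gold M N c (goldAOuter gold (M : Int) (N : Int) dp (c : Int)) := by
  obtain ⟨hlen, hrow, hzero, hval⟩ := h
  have hA : goldAOuter gold (M : Int) (N : Int) dp (c : Int)
      = (List.range M).foldl (fun d k => goldAInner gold (M : Int) (N : Int) (c : Int) d ((0 : Int) + (k : Nat))) dp := by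
    unfold goldAOuter
    rw [PySem.List.pyRange_one]
    simp [List.foldl_map]
  obtain ⟨flen, frow, fval⟩ := gmFoldA_spec gold M N c dp hc hlen hrow M le_rfl
  refine ⟨hA ▸ flen, hA ▸ frow, ?_, ?_⟩
  · intro r j hr hj
    rw [hA, fval r j hr (by omega), if_neg (by omega)]
    exact hzero r j hr (by omega)
  · intro r j hr hcj hjN
    rw [hA, fval r j hr hjN]
    rcases eq_or_ne j c with rfl | hne
    · rw [if_pos ⟨hr, rfl⟩]
      exact gmVal_eq gold M N j dp r hr hc (hzero r j hr (by omega))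
        (fun s hs hsc => hval s (j + 1) hs le_rfl hsc)
    · rw [if_neg (by omega)]
      exact hval r j hr (by omega) hjN

theorem gmInitA (gold : List (List Int)) (M N : Nat) :
    GMA gold M N N
      ((PySem.List.pyRange 0 (M : Int) 1).map
        (fun _ => (PySem.List.pyRange 0 (N : Int) 1).map (fun _ => (0 : Int)))) := by
  have hdp0 : ∀ r : Nat, r < M →
      ((PySem.List.pyRange 0 (M : Int) 1).map
        (fun _ => (PySem.List.pyRange 0 (N : Int) 1).map (fun _ => (0 : Int)))).getD r []
      = (PySem.List.pyRange 0 (N : Int) 1).map (fun _ => (0 : Int)) := by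
    intro r hr
    rw [List.getD_eq_getElem?_getD, List.getElem?_map,
      show (PySem.List.pyRange 0 (M : Int) 1)[r]? = some ((0 : Int) + (r : Nat)) by
        simp [PySem.List.getElem?_pyRange_one]; omega]
    rfl
  have hzrow : ∀ j : Nat, ((PySem.List.pyRange 0 (N : Int) 1).map (fun _ => (0 : Int))).getD j 0 = 0 := by
    intro j
    rw [List.getD_eq_getElem?_getD, List.getElem?_map]
    cases (PySem.List.pyRange 0 (N : Int) 1)[j]? <;> rfl
  refine ⟨?_, ?_, ?_, ?_⟩
  · simp [PySem.List.length_pyRange_one]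
  · intro r hr; rw [hdp0 r hr]; simp [PySem.List.length_pyRange_one]
  · intro r j hr hj; rw [hdp0 r hr]; exact hzrow j
  · intro r j _ hj hjN; omega

theorem gmOuterA (gold : List (List Int)) (M N : Nat)
    (dp0 : List (List Int)) (h0 : GMA gold M N N dp0) :
    ∀ j, j ≤ N → GMA gold M N (N - j)
      ((List.range j).foldl (fun st k => goldAOuter gold (M : Int) (N : Int) st (((N : Int) - 1) - (k : Nat))) dp0) := by
  intro j
  induction j with
  | zero => intro _; simpa using h0
  | succ j ih =>
    intro hj
    rw [List.range_succ, List.foldl_append]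
    simp only [List.foldl_cons, List.foldl_nil]
    rw [show ((N : Int) - 1) - (j : Nat) = ((N - (j + 1) : Nat) : Int) by omega]
    have := gmStepA gold M N (N - (j + 1)) (by omega) _
      (by rw [show N - (j + 1) + 1 = N - j by omega]; exact ih (by omega))
    exact this

-- B's solve returns the true value and preserves the memo invariant
theorem gmSolve_spec (gold : List (List Int)) (M N : Nat) :
    ∀ (fuel : Nat) (R C : Nat) (memo : PySem.Dict (Int × Int) Int),
      R < M → C < N → N - C ≤ fuel → gmInv gold M N memo →
      (gmSolve gold (M : Int) (N : Int) fuel (R : Int) (C : Int) memo).1 = gmV gold M N (N - C) R C ∧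
      gmInv gold M N (gmSolve gold (M : Int) (N : Int) fuel (R : Int) (C : Int) memo).2 := by
  intro fuel
  induction fuel with
  | zero => intro R C memo _ hC hf _; omega
  | succ fuel ih =>
    intro R C memo hR hC _ hinv
    cases hget : memo.get? ((R : Int), (C : Int)) with
    | some v =>
      have hv := hinv (R : Int) (C : Int) v hget
      simp only [gmSolve, hget]
      refine ⟨?_, hinv⟩
      rw [hv.2.2.2.2]; simp
    | none =>
      have hNc : N - C = (N - (C + 1)) + 1 := by omega
      have hC1cast : ((C : Int) + 1) = ((C + 1 : Nat) : Int) := by push_cast; ring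
      -- the three sub-results
      have hp1 : ∀ m0, gmInv gold M N m0 →
          ((if (C : Int) = (N : Int) - 1 then ((0 : Int), m0) else gmSolve gold (M : Int) (N : Int) fuel (R : Int) ((C : Int) + 1) m0).1
            = (if C = N - 1 then 0 else gmV gold M N (N - (C + 1)) R (C + 1))) ∧
          gmInv gold M N (if (C : Int) = (N : Int) - 1 then ((0 : Int), m0) else gmSolve gold (M : Int) (N : Int) fuel (R : Int) ((C : Int) + 1) m0).2 := by
        intro m0 hm0
        rcases eq_or_ne C (N - 1) with hcn | hcn
        · rw [if_pos (by omega), if_pos hcn]; exact ⟨rfl, hm0⟩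
        · rw [if_neg (by omega), if_neg hcn, hC1cast]
          exact ih R (C + 1) m0 hR (by omega) (by omega) hm0
      have hp2 : ∀ m0, gmInv gold M N m0 →
          ((if (R : Int) = 0 ∨ (C : Int) = (N : Int) - 1 then ((0 : Int), m0) else gmSolve gold (M : Int) (N : Int) fuel ((R : Int) - 1) ((C : Int) + 1) m0).1
            = (if R = 0 ∨ C = N - 1 then 0 else gmV gold M N (N - (C + 1)) (R - 1) (C + 1))) ∧
          gmInv gold M N (if (R : Int) = 0 ∨ (C : Int) = (N : Int) - 1 then ((0 : Int), m0) else gmSolve gold (M : Int) (N : Int) fuel ((R : Int) - 1) ((C : Int) + 1) m0).2 := by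
        intro m0 hm0
        by_cases hcase : R = 0 ∨ C = N - 1
        · rw [if_pos (by rcases hcase with h | h; exacts [Or.inl (by omega), Or.inr (by omega)]), if_pos hcase]
          exact ⟨rfl, hm0⟩
        · push_neg at hcase
          rw [if_neg (by push_neg; exact ⟨by omega, by omega⟩), if_neg (not_or.mpr hcase), hC1cast,
            show ((R : Int) - 1) = ((R - 1 : Nat) : Int) by omega]
          exact ih (R - 1) (C + 1) m0 (by omega) (by omega) (by omega) hm0
      have hp3 : ∀ m0, gmInv gold M N m0 →
          ((if (R : Int) = (M : Int) - 1 ∨ (C : Int) = (N : Int) - 1 then ((0 : Int), m0) else gmSolve gold (M : Int) (N : Int) fuel ((R : Int) + 1) ((C : Int) + 1) m0).1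
            = (if R = M - 1 ∨ C = N - 1 then 0 else gmV gold M N (N - (C + 1)) (R + 1) (C + 1))) ∧
          gmInv gold M N (if (R : Int) = (M : Int) - 1 ∨ (C : Int) = (N : Int) - 1 then ((0 : Int), m0) else gmSolve gold (M : Int) (N : Int) fuel ((R : Int) + 1) ((C : Int) + 1) m0).2 := by
        intro m0 hm0
        by_cases hcase : R = M - 1 ∨ C = N - 1
        · rw [if_pos (by rcases hcase with h | h; exacts [Or.inl (by omega), Or.inr (by omega)]), if_pos hcase]
          exact ⟨rfl, hm0⟩
        · push_neg at hcase
          rw [if_neg (by push_neg; exact ⟨by omega, by omega⟩), if_neg (not_or.mpr hcase), hC1cast,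
            show ((R : Int) + 1) = ((R + 1 : Nat) : Int) by push_cast; ring]
          exact ih (R + 1) (C + 1) m0 (by omega) (by omega) (by omega) hm0
      simp only [gmSolve, hget]
      obtain ⟨h1v, h1i⟩ := hp1 memo hinv
      obtain ⟨h2v, h2i⟩ := hp2 _ h1i
      obtain ⟨h3v, h3i⟩ := hp3 _ h2i
      have hvalV : PySem.List.pyGetD (PySem.List.pyGetD gold (R : Int) []) (C : Int) 0 +
          max (max (if R = 0 ∨ C = N - 1 then 0 else gmV gold M N (N - (C + 1)) (R - 1) (C + 1))
                   (if C = N - 1 then 0 else gmV gold M N (N - (C + 1)) R (C + 1)))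
              (if R = M - 1 ∨ C = N - 1 then 0 else gmV gold M N (N - (C + 1)) (R + 1) (C + 1))
          = gmV gold M N (N - C) R C := by
        rw [hNc, gmV_succ, PySem.List.pyGetD_natCast, PySem.List.pyGetD_natCast]
      constructor
      · simp only [h1v, h2v, h3v]
        exact hvalV
      · simp only [h1v, h2v, h3v]
        intro r c v hv
        rw [PySem.Dict.get?_insert] at hv
        by_cases hk : ((r, c) : Int × Int) = ((R : Int), (C : Int))
        · rw [if_pos hk] at hv
          have hr : r = (R : Int) := congrArg Prod.fst hk
          have hc : c = (C : Int) := congrArg Prod.snd hk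
          subst hr; subst hc
          refine ⟨by omega, by omega, by omega, by omega, ?_⟩
          have hveq := Option.some.inj hv
          simp only [Int.toNat_natCast]
          rw [← hveq]
          exact hvalV
        · rw [if_neg hk] at hv
          exact h3i r c v hv

-- B's final reduction fold equals a pure max-fold over the true column-0 values
theorem gmFoldB (gold : List (List Int)) (M N : Nat) :
    ∀ (L : List Int), (∀ x ∈ L, 0 ≤ x ∧ x < (M : Int)) →
    ∀ (res : Int) (memo : PySem.Dict (Int × Int) Int), 1 ≤ N → gmInv gold M N memo →
      (L.foldl (fun st i =>
          (max st.1 (gmSolve gold (M : Int) (N : Int) (N + 1) i 0 st.2).1,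
           (gmSolve gold (M : Int) (N : Int) (N + 1) i 0 st.2).2)) (res, memo)).1
        = L.foldl (fun r i => max r (gmV gold M N N i.toNat 0)) res := by
  intro L
  induction L with
  | nil => intro _ res memo _ _; rfl
  | cons x L ih =>
    intro hmem res memo hN hinv
    obtain ⟨hx0, hxM⟩ := hmem x (List.mem_cons_self)
    have hxcast : x = ((x.toNat : Nat) : Int) := by omega
    have hspec := gmSolve_spec gold M N (N + 1) x.toNat 0 memo (by omega) (by omega) (by omega) hinv
    simp only [List.foldl_cons]
    rw [show (gmSolve gold (M : Int) (N : Int) (N + 1) x 0 memo) = (gmSolve gold (M : Int) (N : Int) (N + 1) ((x.toNat : Nat) : Int) ((0 : Nat) : Int) memo) by rw [← hxcast]; rfl]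
    rw [ih (fun y hy => hmem y (List.mem_cons_of_mem _ hy)) _ _ hN hspec.2]
    congr 1
    rw [hspec.1]
    simp

-- ===== VERDICT (proof) =====
theorem gold_mine_spec : Claim_equal_gold_mine := by
  intro gold m n _ hpre
  obtain ⟨hm1, hmg, hn1, _⟩ := hpre
  have hmm : m = ((m.toNat : Nat) : Int) := by omega
  have hnn : n = ((n.toNat : Nat) : Int) := by omega
  set M := m.toNat with hMdef
  set N := n.toNat with hNdef
  have hM1 : 1 ≤ M := by omega
  have hN1 : 1 ≤ N := by omega
  unfold Spec_gold_mine gold_mine gold_mine_alt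
  rw [hmm, hnn]
  -- A's final table satisfies GMA at column 0
  have hrange : PySem.List.pyRange ((N : Int) - 1) (-1) (-1)
      = (List.range N).map (fun k => ((N : Int) - 1) - (k : Nat)) := by
    rw [PySem.List.pyRange_neg_one]
    congr 2
    omega
  rw [hrange]
  simp only [List.foldl_map]
  have hGMA := gmOuterA gold M N _ (gmInitA gold M N) N le_rfl
  rw [Nat.sub_self] at hGMA
  obtain ⟨hflen, hfrow, _, hfval⟩ := hGMA
  set dpF := (List.range N).foldl (fun st k => goldAOuter gold (M : Int) (N : Int) st (((N : Int) - 1) - (k : Nat)))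
    ((PySem.List.pyRange 0 (M : Int) 1).map (fun _ => (PySem.List.pyRange 0 (N : Int) 1).map (fun _ => (0 : Int)))) with hdpF
  have hread : ∀ i : Int, 0 ≤ i → i < (M : Int) →
      PySem.List.pyGetD (PySem.List.pyGetD dpF i []) 0 0 = gmV gold M N N i.toNat 0 := by
    intro i h1 h2
    have h := hfval i.toNat 0 (by omega) (Nat.zero_le _) (by omega)
    rw [show i = ((i.toNat : Nat) : Int) by omega, PySem.List.pyGetD_natCast,
      show (0 : Int) = ((0 : Nat) : Int) from rfl, PySem.List.pyGetD_natCast,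
      Int.toNat_natCast]
    exact h
  -- B's first call on the empty memo
  have hinv0 : gmInv gold M N PySem.Dict.empty := by
    intro r c v hv
    rw [PySem.Dict.get?_empty] at hv
    exact absurd hv (by simp)
  have hsolve0 := gmSolve_spec gold M N (N + 1) 0 0 PySem.Dict.empty (by omega) (by omega) (by omega) hinv0
  simp only [Nat.cast_zero, Nat.sub_zero] at hsolve0
  have hfuel : ((N : Int).toNat + 1) = N + 1 := by omega
  simp only [hfuel]
  -- the two folds compute the same max
  rw [show (gmSolve gold (M : Int) (N : Int) (N + 1) 0 0 PySem.Dict.empty)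
        = ((gmSolve gold (M : Int) (N : Int) (N + 1) 0 0 PySem.Dict.empty).1,
           (gmSolve gold (M : Int) (N : Int) (N + 1) 0 0 PySem.Dict.empty).2) from rfl]
  rw [gmFoldB gold M N (PySem.List.pyRange 1 (M : Int) 1)
      (by intro x hx; rw [PySem.List.mem_pyRange_one] at hx; omega)
      _ _ hN1 hsolve0.2]
  rw [hsolve0.1, hread 0 le_rfl (by omega)]
  simp only [Int.toNat_zero]
  exact PySem.List.foldl_congr_mem _ _ _ _ (by
    intro acc x hx
    rw [PySem.List.mem_pyRange_one] at hx
    rw [hread x (by omega) hx.2])
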